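-- pv_equiv track=rewrite | github.com/NHPatterson/napari-wsireg | src/napari_wsireg/gui/setup_sub/preprocessing.py | _ch_indices_to_status
-- ===== SOURCE A (Python) =====
-- from typing import Any, Dict, Optional, List
--
-- def _ch_indices_to_status(channel_names: List[str], ch_indices: List[int]):
--     if ch_indices:
--         status = []
--         for i in range(len(channel_names)):
--             if i in ch_indices:
--                 status.append(True)
--             else:
--                 status.append(False)
--     else:
--         status = [True for _ in range(len(channel_names))]
--
--     return status
-- ===== SOURCE B (Python) =====
-- # B: scatter selected indices into a preallocated False list (one pass over ch_indices
-- # instead of an O(n*m) membership test per channel).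
-- def _ch_indices_to_status(channel_names, ch_indices):
--     if ch_indices:
--         n = len(channel_names)
--         status = [False] * n
--         for idx in ch_indices:
--             if 0 <= idx < n:
--                 status[idx] = True
--         return status
--     return [True] * len(channel_names)
-- ===== Notes on version B (the rewrite author's own statement) =====
-- stated objective: faster
-- what changed: Instead of looping over every channel and testing membership of each index in ch_indices, B preallocates a [False]*n list and scatters True at each in-range selected index in one pass over ch_indices.
import Mathlib
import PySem

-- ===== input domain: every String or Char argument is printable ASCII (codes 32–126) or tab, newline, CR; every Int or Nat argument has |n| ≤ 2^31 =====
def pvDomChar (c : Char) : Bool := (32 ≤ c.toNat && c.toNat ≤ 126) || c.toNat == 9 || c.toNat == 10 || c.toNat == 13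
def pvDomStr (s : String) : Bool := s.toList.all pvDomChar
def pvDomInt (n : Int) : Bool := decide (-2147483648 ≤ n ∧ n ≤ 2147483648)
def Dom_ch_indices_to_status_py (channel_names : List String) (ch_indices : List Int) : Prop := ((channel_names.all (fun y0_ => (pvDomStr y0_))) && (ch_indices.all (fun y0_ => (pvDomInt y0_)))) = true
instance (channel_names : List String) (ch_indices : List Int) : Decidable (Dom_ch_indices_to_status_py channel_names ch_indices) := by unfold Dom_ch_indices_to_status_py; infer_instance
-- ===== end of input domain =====

-- B scatters True at each in-range selected index into a preallocated False list,
-- instead of testing membership of every channel index in ch_indices.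

-- ===== PORT A =====
-- A: for i in range(len(channel_names)): append (i in ch_indices); else-branch [True]*n
def ch_indices_to_status_py (channel_names : List String) (ch_indices : List Int) : List Bool :=
  if ch_indices ≠ [] then
    (List.range channel_names.length).foldl
      (fun status (i : Nat) => if (i : Int) ∈ ch_indices then status ++ [true] else status ++ [false]) []
  else
    (List.range channel_names.length).map (fun _ => true)

-- ===== PORT B =====
-- B: status = [False]*n; for idx in ch_indices: if 0 <= idx < n: status[idx] = True
def ch_indices_to_status_py_alt (channel_names : List String) (ch_indices : List Int) : List Bool :=
  if ch_indices ≠ [] then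
    ch_indices.foldl
      (fun status idx =>
        if 0 ≤ idx ∧ idx < (channel_names.length : Int) then status.set idx.toNat true else status)
      (List.replicate channel_names.length false)
  else
    List.replicate channel_names.length true

-- ===== PRECONDITION & SPEC =====
def Spec_ch_indices_to_status_py (channel_names : List String) (ch_indices : List Int) (out : List Bool) : Prop := out = ch_indices_to_status_py_alt channel_names ch_indices
instance (channel_names : List String) (ch_indices : List Int) (out : List Bool) : Decidable (Spec_ch_indices_to_status_py channel_names ch_indices out) := by unfold Spec_ch_indices_to_status_py; infer_instance

-- ===== CLAIM (what is proved, stated in full; the proofs are below) =====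
def Claim_equal_ch_indices_to_status_py : Prop := ∀ (channel_names : List String) (ch_indices : List Int), Dom_ch_indices_to_status_py channel_names ch_indices → Spec_ch_indices_to_status_py channel_names ch_indices (ch_indices_to_status_py channel_names ch_indices)

-- ===== LEMMAS AND PROOFS =====

-- A's loop: appending the branch value over a list is the map of the predicate.
theorem pvA_foldl_map {a : Type} (p : a -> Prop) [DecidablePred p] (l : List a) (acc : List Bool) :
    l.foldl (fun status x => if p x then status ++ [true] else status ++ [false]) acc
      = acc ++ l.map (fun x => decide (p x)) := by
  induction l generalizing acc with
  | nil => simp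
  | cons x xs ih => by_cases hx : p x <;> simp [hx, ih]

-- B's scatter loop: length preserved; element i ends up st[i] || (i selected by ci).
theorem pvB_scatter (n : Nat) (ci : List Int) (st : List Bool) (hlen : st.length = n) :
    (ci.foldl (fun status idx =>
        if 0 ≤ idx ∧ idx < (n : Int) then status.set idx.toNat true else status) st).length = n ∧
    ∀ i : Nat, (ci.foldl (fun status idx =>
        if 0 ≤ idx ∧ idx < (n : Int) then status.set idx.toNat true else status) st)[i]?
      = st[i]?.map (fun b => b || decide ((i : Int) ∈ ci)) := by
  induction ci generalizing st with
  | nil =>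
    refine ⟨hlen, fun i => ?_⟩
    cases h : st[i]? <;> simp [h]
  | cons x xs ih =>
    by_cases hx : 0 ≤ x ∧ x < (n : Int)
    · simp only [List.foldl_cons, if_pos hx]
      obtain ⟨h1, h2⟩ := ih (st.set x.toNat true) (by simp [hlen])
      refine ⟨h1, fun i => ?_⟩
      rw [h2 i]
      by_cases hi : i < st.length
      · by_cases hxi : x.toNat = i
        · subst hxi
          rw [List.getElem?_set_self (by omega), List.getElem?_eq_getElem hi]
          have hc : ((x.toNat : Int)) = x := by omega
          simp [List.mem_cons, hc]
        · have hne : ¬ ((i : Int) = x) := by omega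
          rw [List.getElem?_set_ne hxi]
          simp [List.getElem?_eq_getElem hi, List.mem_cons, hne]
      · rw [List.getElem?_eq_none (by simpa using (by omega : st.length ≤ i)),
            List.getElem?_eq_none (by omega : st.length ≤ i)]
        simp
    · simp only [List.foldl_cons, if_neg hx]
      obtain ⟨h1, h2⟩ := ih st hlen
      refine ⟨h1, fun i => ?_⟩
      rw [h2 i]
      by_cases hi : i < st.length
      · have hne : ¬ ((i : Int) = x) := fun h => hx ⟨by omega, by omega⟩
        simp [List.getElem?_eq_getElem hi, List.mem_cons, hne]
      · rw [List.getElem?_eq_none (by omega : st.length ≤ i)]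
        simp

-- ===== VERDICT (by name: the statement is the Claim_ definition above) =====
theorem ch_indices_to_status_py_spec : Claim_equal_ch_indices_to_status_py := by
  intro cn ci _
  unfold Spec_ch_indices_to_status_py ch_indices_to_status_py ch_indices_to_status_py_alt
  by_cases hci : ci = []
  · simp [hci, List.map_const']
  · simp only [hci, ne_eq, not_false_eq_true, if_pos]
    obtain ⟨hlen, hget⟩ := pvB_scatter cn.length ci (List.replicate cn.length false) (by simp)
    rw [pvA_foldl_map (fun i : Nat => (i : Int) ∈ ci), List.nil_append]
    apply List.ext_getElem?
    intro i
    rw [hget i]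
    by_cases hi : i < cn.length
    · rw [List.getElem?_eq_getElem (by simpa using hi :
            i < ((List.range cn.length).map (fun x : Nat => decide ((x : Int) ∈ ci))).length),
          List.getElem?_eq_getElem (by simpa using hi : i < (List.replicate cn.length false).length)]
      simp
    · rw [List.getElem?_eq_none (by simpa using (by omega : cn.length ≤ i)),
          List.getElem?_eq_none (by simpa using (by omega : cn.length ≤ i))]
      simp
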